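-- pv_equiv track=rewrite | github.com/Jkaslam/CribbageAI | cribbage_scoring.py | count_fifteens
-- ===== SOURCE A (Python) =====
-- import itertools
--
-- def count_fifteens(hand):
--     total_fifteens = 0
--     for i in range(1, 6):
--         combinations = list(itertools.combinations(set(hand), i))
--         for j in range(len(combinations)):
--             currSum = 0
--             for val, suit in combinations[j]:
--                 currSum += min(10, val)
--             if currSum == 15:
--                 total_fifteens += 1
--     return total_fifteens
-- ===== SOURCE B (Python) =====
-- def count_fifteens(hand):
--     # DP over distinct cards: table[(sum, size)] = number of subsets of the
--     # processed cards having that value-sum and that size (sizes capped at 5).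
--     table = {(0, 0): 1}
--     for val, suit in set(hand):
--         v = min(10, val)
--         new = dict(table)
--         for (s, k), c in table.items():
--             if k < 5:
--                 key = (s + v, k + 1)
--                 new[key] = new.get(key, 0) + c
--         table = new
--     return sum(c for (s, k), c in table.items() if s == 15 and 1 <= k <= 5)
-- ===== Notes on version B (the rewrite author's own statement) =====
-- stated objective: faster
-- what changed: Replaces the explicit enumeration of all size-1..5 combinations of the distinct cards with a single pass building a DP table mapping (running sum, subset size) to the number of subsets, then sums the entries with sum 15 and size 1..5.
import Mathlib
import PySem

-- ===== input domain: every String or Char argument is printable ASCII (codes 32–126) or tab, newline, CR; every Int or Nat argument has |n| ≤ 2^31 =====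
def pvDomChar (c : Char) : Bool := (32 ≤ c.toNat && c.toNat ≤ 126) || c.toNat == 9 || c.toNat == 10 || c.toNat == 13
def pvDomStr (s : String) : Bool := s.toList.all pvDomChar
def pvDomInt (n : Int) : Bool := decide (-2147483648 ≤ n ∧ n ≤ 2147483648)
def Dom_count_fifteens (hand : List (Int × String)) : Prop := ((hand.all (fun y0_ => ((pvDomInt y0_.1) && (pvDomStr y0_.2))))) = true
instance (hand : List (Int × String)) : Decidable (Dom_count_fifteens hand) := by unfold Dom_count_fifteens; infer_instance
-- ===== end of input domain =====

-- B replaces A's enumeration of every size-1..5 combination of the distinct cards by one pass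
-- building a DP table (sum, size) -> number of subsets; objective: faster (measured).

-- ===== PORT A =====
def count_fifteens (hand : List (Int × String)) : Int :=
  (PySem.List.pyRange 1 6 1).foldl (fun total_fifteens i =>
    let combinations := PySem.List.combinations (PySem.Set.ofList hand) i.toNat
    combinations.foldl (fun tot comb =>
      let currSum : Int := comb.foldl (fun a c => a + min 10 c.1) 0
      if currSum = 15 then tot + 1 else tot) total_fifteens) 0

-- ===== PORT B =====
-- one DP step: add card of capped value v to every tracked subset of size < 5
def pvStep (v : Int) (cur : PySem.Dict (Int × Int) Int) : PySem.Dict (Int × Int) Int :=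
  cur.items.foldl (fun nd e =>
    if e.1.2 < 5 then
      nd.insert (e.1.1 + v, e.1.2 + 1) (nd.getD (e.1.1 + v, e.1.2 + 1) 0 + e.2)
    else nd) cur

def count_fifteens_alt (hand : List (Int × String)) : Int :=
  let table := (PySem.Set.ofList hand).foldl (fun t c => pvStep (min 10 c.1) t)
      (PySem.Dict.empty.insert ((0 : Int), (0 : Int)) (1 : Int))
  table.items.foldl (fun acc e =>
    if e.1.1 = 15 ∧ 1 ≤ e.1.2 ∧ e.1.2 ≤ 5 then acc + e.2 else acc) 0

-- ===== PRECONDITION & SPEC =====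
def Spec_count_fifteens (hand : List (Int × String)) (out : Int) : Prop := out = count_fifteens_alt hand
instance (hand : List (Int × String)) (out : Int) : Decidable (Spec_count_fifteens hand out) := by unfold Spec_count_fifteens; infer_instance

-- ===== CLAIM (what is proved, stated in full; the proofs are below) =====
def Claim_equal_count_fifteens : Prop := ∀ (hand : List (Int × String)), Dom_count_fifteens hand → Spec_count_fifteens hand (count_fifteens hand)

-- ===== LEMMAS AND PROOFS =====

-- number of sublists of l with capped-value sum s and length k (k an Int; 0 for k < 0)
def pvCnt : List (Int × String) → Int → Int → Int
  | [], s, k => if s = 0 ∧ k = 0 then 1 else 0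
  | x :: l, s, k => pvCnt l s k + pvCnt l (s - min 10 x.1) (k - 1)

lemma pvCnt_neg : ∀ (l : List (Int × String)) (s k : Int), k < 0 → pvCnt l s k = 0 := by
  intro l
  induction l with
  | nil => intro s k hk; simp [pvCnt]; omega
  | cons x l ih =>
    intro s k hk
    simp only [pvCnt, ih _ _ hk, ih _ _ (by omega : k - 1 < 0)]
    ring

lemma pvCnt_zero : ∀ (l : List (Int × String)) (s : Int), pvCnt l s 0 = if s = 0 then 1 else 0 := by
  intro l
  induction l with
  | nil => intro s; simp [pvCnt]
  | cons x l ih =>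
    intro s
    simp only [pvCnt, ih, pvCnt_neg _ _ _ (by omega : (0 : Int) - 1 < 0), add_zero]

lemma pvCnt_snoc : ∀ (l : List (Int × String)) (x : Int × String) (s k : Int),
    pvCnt (l ++ [x]) s k = pvCnt l s k + pvCnt l (s - min 10 x.1) (k - 1) := by
  intro l
  induction l with
  | nil => intro x s k; simp [pvCnt]
  | cons y l ih =>
    intro x s k
    simp only [List.cons_append, pvCnt, ih]
    ring

lemma pvFoldl_shift : ∀ (comb : List (Int × String)) (a : Int),
    comb.foldl (fun acc c => acc + min 10 c.1) a = a + comb.foldl (fun acc c => acc + min 10 c.1) 0 := by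
  intro comb
  induction comb with
  | nil => intro a; simp
  | cons c t ih =>
    intro a
    simp only [List.foldl_cons]
    rw [ih (a + min 10 c.1), ih (0 + min 10 c.1)]
    ring

lemma pvCombs_count : ∀ (l : List (Int × String)) (n : Nat) (s tot : Int),
    (PySem.List.combinations l n).foldl (fun t comb =>
      if comb.foldl (fun a c => a + min 10 c.1) 0 = s then t + 1 else t) tot
    = tot + pvCnt l s (n : Int) := by
  intro l
  induction l with
  | nil =>
    intro n s tot
    cases n with
    | zero =>
      simp only [PySem.List.combinations_zero, List.foldl_cons, List.foldl_nil, Nat.cast_zero, pvCnt_zero]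
      split_ifs <;> omega
    | succ n =>
      simp only [PySem.List.combinations_nil_succ, List.foldl_nil, pvCnt]
      split_ifs with h
      · exfalso
        have h2 := h.2
        push_cast at h2
        omega
      · omega
  | cons x l ih =>
    intro n s tot
    cases n with
    | zero =>
      simp only [PySem.List.combinations_zero, List.foldl_cons, List.foldl_nil, Nat.cast_zero, pvCnt_zero]
      split_ifs <;> omega
    | succ n =>
      rw [PySem.List.combinations_cons_succ, List.foldl_append, List.foldl_map]
      have hfun : (fun (t : Int) (comb : List (Int × String)) =>
          if (x :: comb).foldl (fun a c => a + min 10 c.1) 0 = s then t + 1 else t)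
          = (fun (t : Int) (comb : List (Int × String)) =>
          if comb.foldl (fun a c => a + min 10 c.1) 0 = s - min 10 x.1 then t + 1 else t) := by
        funext t comb
        have h : ((x :: comb).foldl (fun a c => a + min 10 c.1) 0 = s)
            ↔ (comb.foldl (fun a c => a + min 10 c.1) 0 = s - min 10 x.1) := by
          rw [List.foldl_cons, pvFoldl_shift]
          omega
        rw [if_congr h rfl rfl]
      rw [hfun, ih n (s - min 10 x.1) tot, ih (n + 1) s _]
      simp only [pvCnt]
      push_cast
      have : ((n : Int) + 1 - 1) = (n : Int) := by ring
      rw [this]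
      ring

-- value of the first entry of an association list at a key (0 if absent)
def pvLk (L : List ((Int × Int) × Int)) (key : Int × Int) : Int :=
  ((L.find? (fun q => q.1 == key)).map (·.2)).getD 0

lemma pvLk_cons (e : (Int × Int) × Int) (L : List ((Int × Int) × Int)) (key : Int × Int) :
    pvLk (e :: L) key = if e.1 = key then e.2 else pvLk L key := by
  by_cases h : e.1 = key
  · rw [pvLk, List.find?_cons_of_pos (by simp [h]), if_pos h]
    simp
  · rw [pvLk, List.find?_cons_of_neg (by simp [h]), if_neg h]
    rfl

lemma pvLk_not_mem (L : List ((Int × Int) × Int)) (key : Int × Int)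
    (h : key ∉ L.map (·.1)) : pvLk L key = 0 := by
  induction L with
  | nil => rfl
  | cons e L ih =>
    simp only [List.map_cons, List.mem_cons] at h
    push_neg at h
    rw [pvLk_cons, if_neg (fun he => h.1 he.symm), ih h.2]

lemma pvLk_eq_getD : ∀ (L : List ((Int × Int) × Int)) (key : Int × Int),
    pvLk L key = (PySem.Dict.mk L).getD key 0 := by
  intro L
  induction L with
  | nil => intro key; rfl
  | cons e L ih =>
    intro key
    obtain ⟨k1, v1⟩ := e
    rw [pvLk_cons, PySem.Dict.getD_eq_get?_getD, PySem.Dict.get?_mk_cons]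
    by_cases h : k1 = key
    · simp [h]
    · simp [h, ih, PySem.Dict.getD_eq_get?_getD]

lemma pvLk_items (d : PySem.Dict (Int × Int) Int) (key : Int × Int) :
    pvLk d.items key = d.getD key 0 := by
  rw [pvLk_eq_getD]

lemma pvFold_getD (v : Int) : ∀ (L : List ((Int × Int) × Int)) (d : PySem.Dict (Int × Int) Int)
    (key : Int × Int), (L.map (·.1)).Nodup →
    (L.foldl (fun nd e =>
      if e.1.2 < 5 then
        nd.insert (e.1.1 + v, e.1.2 + 1) (nd.getD (e.1.1 + v, e.1.2 + 1) 0 + e.2)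
      else nd) d).getD key 0
    = d.getD key 0 + (if key.2 - 1 < 5 then pvLk L (key.1 - v, key.2 - 1) else 0) := by
  intro L
  induction L with
  | nil => intro d key _; simp [pvLk]
  | cons e L ih =>
    intro d key hnd
    simp only [List.map_cons, List.nodup_cons] at hnd
    obtain ⟨hmem, hnd'⟩ := hnd
    rw [List.foldl_cons]
    by_cases he : e.1.2 < 5
    · rw [if_pos he, ih _ key hnd', PySem.Dict.getD_insert]
      by_cases hk : key = (e.1.1 + v, e.1.2 + 1)
      · subst hk
        have h1 : ((e.1.1 + v, e.1.2 + 1).1 - v, (e.1.1 + v, e.1.2 + 1).2 - 1) = e.1 := by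
          rw [Prod.ext_iff]
          constructor <;> simp
        rw [if_pos rfl, if_pos (by simp; omega), if_pos (by simp; omega), h1,
            pvLk_not_mem L e.1 hmem, pvLk_cons, if_pos rfl]
        ring
      · rw [if_neg hk]
        have h2 : (key.1 - v, key.2 - 1) ≠ e.1 := by
          intro h
          apply hk
          have h3 := congrArg Prod.fst h
          have h4 := congrArg Prod.snd h
          simp at h3 h4
          have hkey : key = (key.1, key.2) := rfl
          rw [hkey, Prod.mk.injEq]
          omega
        congr 1
        by_cases hg : key.2 - 1 < 5
        · rw [if_pos hg, if_pos hg, pvLk_cons, if_neg (fun h => h2 h.symm)]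
        · rw [if_neg hg, if_neg hg]
    · rw [if_neg he, ih _ key hnd']
      congr 1
      by_cases hg : key.2 - 1 < 5
      · rw [if_pos hg, if_pos hg, pvLk_cons, if_neg]
        intro h
        have h4 := congrArg Prod.snd h
        simp at h4
        omega
      · rw [if_neg hg, if_neg hg]

lemma pvFold_keys_nodup (v : Int) : ∀ (L : List ((Int × Int) × Int)) (d : PySem.Dict (Int × Int) Int),
    d.keys.Nodup →
    (L.foldl (fun nd e =>
      if e.1.2 < 5 then
        nd.insert (e.1.1 + v, e.1.2 + 1) (nd.getD (e.1.1 + v, e.1.2 + 1) 0 + e.2)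
      else nd) d).keys.Nodup := by
  intro L
  induction L with
  | nil => intro d h; exact h
  | cons e L ih =>
    intro d h
    rw [List.foldl_cons]
    by_cases he : e.1.2 < 5
    · rw [if_pos he]
      exact ih _ (PySem.Dict.nodup_keys_insert _ _ _ h)
    · rw [if_neg he]
      exact ih _ h

-- the DP table after processing the cards of l (same fold as in count_fifteens_alt)
def pvTable (l : List (Int × String)) : PySem.Dict (Int × Int) Int :=
  l.foldl (fun t c => pvStep (min 10 c.1) t) (PySem.Dict.empty.insert ((0 : Int), (0 : Int)) (1 : Int))

lemma pvTable_inv : ∀ (l : List (Int × String)), (pvTable l).keys.Nodup ∧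
    ∀ (s k : Int), k ≤ 5 → (pvTable l).getD (s, k) 0 = pvCnt l s k := by
  intro l
  induction l using List.reverseRecOn with
  | nil =>
    constructor
    · decide
    · intro s k hk
      simp [pvTable, PySem.Dict.getD_insert, PySem.Dict.getD_empty, pvCnt, Prod.ext_iff]
  | append_singleton l x ih =>
    obtain ⟨hnd, hinv⟩ := ih
    have hstep : pvTable (l ++ [x]) = pvStep (min 10 x.1) (pvTable l) := by
      simp [pvTable, List.foldl_append]
    constructor
    · rw [hstep]
      exact pvFold_keys_nodup _ _ _ hnd
    · intro s k hk
      rw [hstep]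
      unfold pvStep
      rw [pvFold_getD (min 10 x.1) (pvTable l).items (pvTable l) (s, k)
        (by simpa [PySem.Dict.keys] using hnd)]
      have hp1 : ((s, k).1 : Int) = s := rfl
      have hp2 : ((s, k).2 : Int) = k := rfl
      rw [hp1, hp2, if_pos (by omega : k - 1 < 5), pvLk_items, pvCnt_snoc,
          hinv s k hk, hinv (s - min 10 x.1) (k - 1) (by omega)]

lemma pvSum_update : ∀ (K : List (Int × Int)) (f : (Int × Int) → Int) (x : Int × Int) (c : Int),
    K.Nodup → x ∈ K →
    (K.map (fun key => if x = key then c else f key)).sum = (K.map f).sum + c - f x := by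
  intro K
  induction K with
  | nil => intro f x c _ hx; simp at hx
  | cons y K ih =>
    intro f x c hnd hx
    rw [List.nodup_cons] at hnd
    by_cases hxy : x = y
    · subst hxy
      have hK : K.map (fun key => if x = key then c else f key) = K.map f :=
        List.map_congr_left (fun key hkey => by
          rw [if_neg (fun h : x = key => hnd.1 (h ▸ hkey))])
      simp only [List.map_cons, List.sum_cons, if_true, eq_self_iff_true, hK]
      ring
    · have hx' : x ∈ K := by
        rcases List.mem_cons.mp hx with h | h
        · exact absurd h hxy
        · exact h
      simp only [List.map_cons, List.sum_cons, if_neg hxy, ih f x c hnd.2 hx']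
      ring

lemma pvSumSel : ∀ (L : List ((Int × Int) × Int)) (K : List (Int × Int)) (a : Int),
    (L.map (·.1)).Nodup → K.Nodup →
    L.foldl (fun acc e => if e.1 ∈ K then acc + e.2 else acc) a
    = a + (K.map (fun key => pvLk L key)).sum := by
  intro L
  induction L with
  | nil =>
    intro K a _ _
    have : K.map (fun key => pvLk ([] : List ((Int × Int) × Int)) key)
        = K.map (fun _ => (0 : Int)) := List.map_congr_left (fun key _ => rfl)
    simp [this]
  | cons e L ih =>
    intro K a hnd hK
    simp only [List.map_cons, List.nodup_cons] at hnd
    obtain ⟨hmem, hnd'⟩ := hnd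
    rw [List.foldl_cons]
    have hmap : K.map (fun key => pvLk (e :: L) key)
        = K.map (fun key => if e.1 = key then e.2 else pvLk L key) :=
      List.map_congr_left (fun key _ => pvLk_cons e L key)
    by_cases hm : e.1 ∈ K
    · rw [if_pos hm, ih K (a + e.2) hnd' hK, hmap,
          pvSum_update K (fun key => pvLk L key) e.1 e.2 hK hm, pvLk_not_mem L e.1 hmem]
      ring
    · rw [if_neg hm, ih K a hnd' hK, hmap]
      have : K.map (fun key => if e.1 = key then e.2 else pvLk L key)
          = K.map (fun key => pvLk L key) :=
        List.map_congr_left (fun key hkey => by rw [if_neg (fun h : e.1 = key => hm (h ▸ hkey))])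
      rw [this]

lemma pvCond_mem (p : Int × Int) :
    (p.1 = 15 ∧ 1 ≤ p.2 ∧ p.2 ≤ 5) ↔
      p ∈ ([((15 : Int), (1 : Int)), (15, 2), (15, 3), (15, 4), (15, 5)] : List (Int × Int)) := by
  simp [Prod.ext_iff]
  omega

lemma pvAlt_eq (hand : List (Int × String)) :
    count_fifteens_alt hand =
      pvCnt (PySem.Set.ofList hand) 15 1 + pvCnt (PySem.Set.ofList hand) 15 2
      + pvCnt (PySem.Set.ofList hand) 15 3 + pvCnt (PySem.Set.ofList hand) 15 4
      + pvCnt (PySem.Set.ofList hand) 15 5 := by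
  obtain ⟨hnd, hinv⟩ := pvTable_inv (PySem.Set.ofList hand)
  have h0 : count_fifteens_alt hand
      = (pvTable (PySem.Set.ofList hand)).items.foldl
        (fun acc e => if e.1.1 = 15 ∧ 1 ≤ e.1.2 ∧ e.1.2 ≤ 5 then acc + e.2 else acc) 0 := rfl
  have hfun : (fun (acc : Int) (e : (Int × Int) × Int) =>
        if e.1.1 = 15 ∧ 1 ≤ e.1.2 ∧ e.1.2 ≤ 5 then acc + e.2 else acc)
      = (fun (acc : Int) (e : (Int × Int) × Int) =>
        if e.1 ∈ ([((15 : Int), (1 : Int)), (15, 2), (15, 3), (15, 4), (15, 5)] : List (Int × Int))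
        then acc + e.2 else acc) := by
    funext acc e
    rw [if_congr (pvCond_mem e.1) rfl rfl]
  rw [h0, hfun, pvSumSel _ _ 0 (by simpa [PySem.Dict.keys] using hnd) (by decide)]
  simp only [List.map_cons, List.map_nil, List.sum_cons, List.sum_nil]
  rw [pvLk_items, pvLk_items, pvLk_items, pvLk_items, pvLk_items,
      hinv 15 1 (by omega), hinv 15 2 (by omega), hinv 15 3 (by omega),
      hinv 15 4 (by omega), hinv 15 5 (by omega)]
  ring

-- ===== VERDICT (by name: the statement is the Claim_ definition above) =====
theorem count_fifteens_spec : Claim_equal_count_fifteens := by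
  intro hand _
  unfold Spec_count_fifteens
  rw [pvAlt_eq]
  simp only [count_fifteens]
  rw [show PySem.List.pyRange 1 6 1 = [1, 2, 3, 4, 5] from by decide]
  simp only [List.foldl_cons, List.foldl_nil, Int.reduceToNat]
  rw [pvCombs_count, pvCombs_count, pvCombs_count, pvCombs_count, pvCombs_count]
  push_cast
  ring
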